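-- pv_equiv track=rewrite | github.com/hrafael2011/draAcostaNutribot | backend/app/services/telegram_handler.py | _diet_quick_adjust_markup
-- ===== SOURCE A (Python) =====
-- _DIET_QUICK_ADJUST: dict[str, tuple[str, str]] = {
--     "more_prot": (
--         "Más proteína",
--         "Ajuste rápido: aumenta la proporción de proteína en el plan manteniendo variedad "
--         "y respetando alergias y restricciones del paciente.",
--     ),
--     "less_cal": (
--         "Menos calorías",
--         "Ajuste rápido: reduce las calorías diarias del plan en torno a un 10–15 %, "
--         "priorizando volumen con verduras y alimentos integrales.",
--     ),
--     "more_cal": (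
--         "Más calorías",
--         "Ajuste rápido: incrementa las calorías diarias del plan en torno a un 10–15 % "
--         "con alimentos nutritivos y bien tolerados.",
--     ),
--     "mediter": (
--         "Estilo mediterráneo",
--         "Ajuste rápido: orienta el plan hacia un patrón mediterráneo (verdura, legumbres, "
--         "frutos secos, pescado, aceite de oliva virgen, cereales integrales).",
--     ),
--     "low_carb": (
--         "Menos hidratos",
--         "Ajuste rápido: reduce hidratos refinados o de acompañamiento en favor de verdura "
--         "y proteína, sin restricción extrema.",
--     ),
--     "snack_add": (
--         "Incluir snack",
--         "Ajuste rápido: incorpora o refuerza una merienda/snack saludable entre comidas principales.",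
--     ),
--     "snack_rm": (
--         "Quitar snack",
--         "Ajuste rápido: elimina la merienda/snack y redistribuye la ingesta en desayuno, comida y cena.",
--     ),
--     "less_ultra": (
--         "Menos ultraprocesados",
--         "Ajuste rápido: reduce ultraprocesados y fritos; prioriza alimentos frescos y preparación casera simple.",
--     ),
-- }
--
-- def _diet_quick_adjust_markup(diet_id: int) -> dict:
--     rows: list[list[dict]] = []
--     pair: list[dict] = []
--     for code, (label, _) in _DIET_QUICK_ADJUST.items():
--         pair.append(
--             {
--                 "text": label,
--                 "callback_data": f"diet:quick:{code}:{diet_id}",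
--             }
--         )
--         if len(pair) == 2:
--             rows.append(pair)
--             pair = []
--     if pair:
--         rows.append(pair)
--     rows.append(
--         [
--             {
--                 "text": "« Volver a la vista previa",
--                 "callback_data": f"diet:preview:reshow:{diet_id}",
--             }
--         ]
--     )
--     return {"inline_keyboard": rows}
-- ===== SOURCE B (Python) =====
-- _DIET_QUICK_ADJUST = {
--     "more_prot": (
--         "Más proteína",
--         "Ajuste rápido: aumenta la proporción de proteína en el plan manteniendo variedad "
--         "y respetando alergias y restricciones del paciente.",
--     ),
--     "less_cal": (
--         "Menos calorías",
--         "Ajuste rápido: reduce las calorías diarias del plan en torno a un 10–15 %, "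
--         "priorizando volumen con verduras y alimentos integrales.",
--     ),
--     "more_cal": (
--         "Más calorías",
--         "Ajuste rápido: incrementa las calorías diarias del plan en torno a un 10–15 % "
--         "con alimentos nutritivos y bien tolerados.",
--     ),
--     "mediter": (
--         "Estilo mediterráneo",
--         "Ajuste rápido: orienta el plan hacia un patrón mediterráneo (verdura, legumbres, "
--         "frutos secos, pescado, aceite de oliva virgen, cereales integrales).",
--     ),
--     "low_carb": (
--         "Menos hidratos",
--         "Ajuste rápido: reduce hidratos refinados o de acompañamiento en favor de verdura "
--         "y proteína, sin restricción extrema.",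
--     ),
--     "snack_add": (
--         "Incluir snack",
--         "Ajuste rápido: incorpora o refuerza una merienda/snack saludable entre comidas principales.",
--     ),
--     "snack_rm": (
--         "Quitar snack",
--         "Ajuste rápido: elimina la merienda/snack y redistribuye la ingesta en desayuno, comida y cena.",
--     ),
--     "less_ultra": (
--         "Menos ultraprocesados",
--         "Ajuste rápido: reduce ultraprocesados y fritos; prioriza alimentos frescos y preparación casera simple.",
--     ),
-- }
--
--
-- def _diet_quick_adjust_markup(diet_id: int) -> dict:
--     buttons = [
--         {"text": label, "callback_data": f"diet:quick:{code}:{diet_id}"}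
--         for code, (label, _) in _DIET_QUICK_ADJUST.items()
--     ]
--     rows = [buttons[i:i + 2] for i in range(0, len(buttons), 2)]
--     rows.append(
--         [
--             {
--                 "text": "« Volver a la vista previa",
--                 "callback_data": f"diet:preview:reshow:{diet_id}",
--             }
--         ]
--     )
--     return {"inline_keyboard": rows}
-- ===== Notes on version B (the rewrite author's own statement) =====
-- stated objective: simpler
-- what changed: Replaces the stateful accumulate-pair-and-flush loop with a two-pass build-then-chunk decomposition: a flat comprehension over the items followed by slicing into rows of two.
import Mathlib
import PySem

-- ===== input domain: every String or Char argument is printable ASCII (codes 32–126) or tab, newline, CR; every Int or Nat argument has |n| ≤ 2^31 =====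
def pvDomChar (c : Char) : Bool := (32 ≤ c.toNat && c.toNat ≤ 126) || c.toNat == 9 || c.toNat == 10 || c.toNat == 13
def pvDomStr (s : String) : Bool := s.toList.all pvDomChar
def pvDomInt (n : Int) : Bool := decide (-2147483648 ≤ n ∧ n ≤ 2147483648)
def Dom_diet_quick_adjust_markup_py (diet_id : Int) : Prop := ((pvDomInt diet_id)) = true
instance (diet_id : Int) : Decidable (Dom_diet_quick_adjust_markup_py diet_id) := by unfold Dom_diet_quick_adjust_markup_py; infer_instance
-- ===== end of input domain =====

-- B changes the decomposition only: the stateful accumulate-pair-and-flush loop becomes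
-- a flat build pass followed by slice-chunking into rows of two (objective: simpler).

-- ===== PORT A =====

-- the module constant _DIET_QUICK_ADJUST, an insertion-ordered dict: code ↦ (label, description)
def dietQuickAdjust : List (String × (String × String)) := [
  ("more_prot", ("Más proteína", "Ajuste rápido: aumenta la proporción de proteína en el plan manteniendo variedad y respetando alergias y restricciones del paciente.")),
  ("less_cal", ("Menos calorías", "Ajuste rápido: reduce las calorías diarias del plan en torno a un 10–15 %, priorizando volumen con verduras y alimentos integrales.")),
  ("more_cal", ("Más calorías", "Ajuste rápido: incrementa las calorías diarias del plan en torno a un 10–15 % con alimentos nutritivos y bien tolerados.")),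
  ("mediter", ("Estilo mediterráneo", "Ajuste rápido: orienta el plan hacia un patrón mediterráneo (verdura, legumbres, frutos secos, pescado, aceite de oliva virgen, cereales integrales).")),
  ("low_carb", ("Menos hidratos", "Ajuste rápido: reduce hidratos refinados o de acompañamiento en favor de verdura y proteína, sin restricción extrema.")),
  ("snack_add", ("Incluir snack", "Ajuste rápido: incorpora o refuerza una merienda/snack saludable entre comidas principales.")),
  ("snack_rm", ("Quitar snack", "Ajuste rápido: elimina la merienda/snack y redistribuye la ingesta en desayuno, comida y cena.")),
  ("less_ultra", ("Menos ultraprocesados", "Ajuste rápido: reduce ultraprocesados y fritos; prioriza alimentos frescos y preparación casera simple."))]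

-- A's loop: append the button to `pair`, flush into `rows` when `pair` has two entries
def diet_quick_adjust_markup_py (diet_id : Int) : List (String × List (List (List (String × String)))) :=
  let st := dietQuickAdjust.foldl
    (fun (st : List (List (List (String × String))) × List (List (String × String)))
         (item : String × (String × String)) =>
      let rows := st.1
      let pair := st.2
      let pair := pair ++ [[("text", item.2.1),
        ("callback_data", ("diet:quick:" ++ item.1 ++ ":") ++ PySem.Int.toStr diet_id)]]
      if pair.length = 2 then (rows ++ [pair], []) else (rows, pair))
    ([], [])
  let rows := st.1
  let rows := if st.2 ≠ [] then rows ++ [st.2] else rows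
  let rows := rows ++ [[[("text", "« Volver a la vista previa"),
    ("callback_data", "diet:preview:reshow:" ++ PySem.Int.toStr diet_id)]]]
  [("inline_keyboard", rows)]

-- ===== PORT B =====

def diet_quick_adjust_markup_py_alt (diet_id : Int) : List (String × List (List (List (String × String)))) :=
  let buttons := dietQuickAdjust.map (fun item =>
    [("text", item.2.1),
     ("callback_data", ("diet:quick:" ++ item.1 ++ ":") ++ PySem.Int.toStr diet_id)])
  let rows := (PySem.List.pyRange 0 buttons.length 2).map
    (fun i => PySem.List.slice buttons (some i) (some (i + 2)))
  let rows := rows ++ [[[("text", "« Volver a la vista previa"),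
    ("callback_data", "diet:preview:reshow:" ++ PySem.Int.toStr diet_id)]]]
  [("inline_keyboard", rows)]

-- ===== PRECONDITION & SPEC =====
def Spec_diet_quick_adjust_markup_py (diet_id : Int) (out : List (String × List (List (List (String × String))))) : Prop := out = diet_quick_adjust_markup_py_alt diet_id
instance (diet_id : Int) (out : List (String × List (List (List (String × String))))) : Decidable (Spec_diet_quick_adjust_markup_py diet_id out) := by unfold Spec_diet_quick_adjust_markup_py; infer_instance

-- ===== CLAIM (what is proved, stated in full; the proofs are below) =====
def Claim_equal_diet_quick_adjust_markup_py : Prop := ∀ (diet_id : Int), Dom_diet_quick_adjust_markup_py diet_id → Spec_diet_quick_adjust_markup_py diet_id (diet_quick_adjust_markup_py diet_id)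

-- ===== LEMMAS AND PROOFS =====

-- ===== VERDICT (by name: the statement is the Claim_ definition above) =====
theorem diet_quick_adjust_markup_py_spec : Claim_equal_diet_quick_adjust_markup_py := by
  intro diet_id _
  unfold Spec_diet_quick_adjust_markup_py diet_quick_adjust_markup_py diet_quick_adjust_markup_py_alt dietQuickAdjust
  simp [PySem.List.pyRange, PySem.List.slice, PySem.List.clampIdx, List.range_succ]
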